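-- pv_equiv track=rewrite | github.com/chuksoo/CodeMasters | TIP102 - Intermediate Technical Interview Prep/Unit 2 practice.py | num_equiv_species_pairs
-- ===== SOURCE A (Python) =====
-- def num_equiv_species_pairs(species_pairs):
--     pair_count = {}
--     total_pairs = 0
--
--     for pair in species_pairs:
--         pair.sort()
--         pair = tuple(pair)
--
--         if pair in pair_count:
--             total_pairs += pair_count[pair]
--             pair_count[pair] += 1
--         else:
--             pair_count[pair] = 1
--     return total_pairs
-- ===== SOURCE B (Python) =====
-- def num_equiv_species_pairs(species_pairs):
--     for pair in species_pairs:
--         pair.sort()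
--     total = 0
--     suffix = list(species_pairs)
--     while suffix:
--         head = suffix.pop(0)
--         total += suffix.count(head)
--     return total
-- ===== Notes on version B (the rewrite author's own statement) =====
-- stated objective: alternative
-- what changed: B drops the hash table entirely: after sorting each pair in place, it brute-force counts, for each element, how many later elements are equal (number of equal unordered pairs), instead of A's single-pass dictionary of running multiplicities.
import Mathlib
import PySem

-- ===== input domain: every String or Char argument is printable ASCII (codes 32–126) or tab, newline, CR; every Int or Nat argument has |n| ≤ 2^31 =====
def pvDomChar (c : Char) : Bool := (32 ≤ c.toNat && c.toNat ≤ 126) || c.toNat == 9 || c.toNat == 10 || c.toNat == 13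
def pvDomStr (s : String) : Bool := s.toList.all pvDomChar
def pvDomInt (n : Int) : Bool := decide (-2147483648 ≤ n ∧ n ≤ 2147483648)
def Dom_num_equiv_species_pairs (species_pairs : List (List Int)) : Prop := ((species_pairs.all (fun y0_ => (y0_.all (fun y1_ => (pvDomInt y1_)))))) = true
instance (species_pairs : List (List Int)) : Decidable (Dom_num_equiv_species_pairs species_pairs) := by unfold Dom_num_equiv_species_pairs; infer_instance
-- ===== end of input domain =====

-- B replaces A's running-count dictionary by a brute-force scan: sort each pair in place, then
-- for each element count equal later elements (both A and B sort each inner list in place;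
-- the equivalence proved here is about the return value).


-- ===== PORT A =====
def num_equiv_species_pairs (species_pairs : List (List Int)) : Int :=
  (species_pairs.foldl
    (fun (st : PySem.Dict (List Int) Int × Int) pair =>
      let key := PySem.List.sorted pair (fun x => x) false
      if st.1.contains key then
        (st.1.insert key (st.1.getD key 0 + 1), st.2 + st.1.getD key 0)
      else
        (st.1.insert key 1, st.2))
    (PySem.Dict.empty, 0)).2

-- ===== PORT B =====
-- B's while-loop: pop the head of the suffix, add the number of equal elements left in it.
def numEquivSuffixLoop : Int → List (List Int) → Int
  | total, [] => total
  | total, head :: suffix => numEquivSuffixLoop (total + (suffix.count head : Int)) suffix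

def num_equiv_species_pairs_alt (species_pairs : List (List Int)) : Int :=
  -- the first Python loop sorts every inner list in place; later reads see the sorted lists
  let sortedPairs := species_pairs.map (fun p => PySem.List.sorted p (fun x => x) false)
  numEquivSuffixLoop 0 sortedPairs

-- ===== PRECONDITION & SPEC =====
def Spec_num_equiv_species_pairs (species_pairs : List (List Int)) (out : Int) : Prop := out = num_equiv_species_pairs_alt species_pairs
instance (species_pairs : List (List Int)) (out : Int) : Decidable (Spec_num_equiv_species_pairs species_pairs out) := by unfold Spec_num_equiv_species_pairs; infer_instance

-- ===== CLAIM (what is proved, stated in full; the proofs are below) =====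
def Claim_equal_num_equiv_species_pairs : Prop := ∀ (species_pairs : List (List Int)), Dom_num_equiv_species_pairs species_pairs → Spec_num_equiv_species_pairs species_pairs (num_equiv_species_pairs species_pairs)

-- ===== LEMMAS AND PROOFS =====

-- A's loop, run directly on the list of (already sorted) keys.
def totalA (ks : List (List Int)) : Int :=
  (ks.foldl
    (fun (st : PySem.Dict (List Int) Int × Int) key =>
      if st.1.contains key then
        (st.1.insert key (st.1.getD key 0 + 1), st.2 + st.1.getD key 0)
      else
        (st.1.insert key 1, st.2))
    (PySem.Dict.empty, 0)).2

-- appending one key adds its previous multiplicity to A's running total.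
lemma totalA_append (ks : List (List Int)) (k : List Int) :
    totalA (ks ++ [k]) = totalA ks + (ks.count k : Int) := by
  unfold totalA
  rw [List.foldl_append]
  have hfst : ∀ (l : List (List Int)) (d : PySem.Dict (List Int) Int) (t : Int),
      (l.foldl
        (fun (st : PySem.Dict (List Int) Int × Int) key =>
          if st.1.contains key then
            (st.1.insert key (st.1.getD key 0 + 1), st.2 + st.1.getD key 0)
          else
            (st.1.insert key 1, st.2)) (d, t)).1
      = l.foldl (fun d key => d.insert key (d.getD key 0 + 1)) d := by
    intro l
    induction l with
    | nil => intro d t; rfl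
    | cons x xs ih =>
      intro d t
      simp only [List.foldl_cons]
      by_cases h : d.contains x = true
      · rw [if_pos h]; exact ih _ _
      · have h' : d.contains x = false := by simpa using h
        rw [if_neg h, PySem.Dict.getD_of_not_contains d (0 : Int) h', zero_add]
        exact ih _ _
  set st := ks.foldl
      (fun (st : PySem.Dict (List Int) Int × Int) key =>
        if st.1.contains key then
          (st.1.insert key (st.1.getD key 0 + 1), st.2 + st.1.getD key 0)
        else
          (st.1.insert key 1, st.2)) (PySem.Dict.empty, 0) with hst
  have h1 : st.1 = PySem.Dict.counter ks := by
    rw [hst, hfst, PySem.Dict.foldl_insert_getD_add_one_eq_counter]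
  have hget : st.1.getD k 0 = (ks.count k : Int) := by
    rw [h1, PySem.Dict.getD_counter]
  simp only [List.foldl_cons, List.foldl_nil]
  by_cases h : st.1.contains k = true
  · rw [if_pos h]
    show st.2 + st.1.getD k 0 = st.2 + (ks.count k : Int)
    rw [hget]
  · rw [if_neg h]
    show st.2 = st.2 + (ks.count k : Int)
    have h' : st.1.contains k = false := by simpa using h
    have : (ks.count k : Int) = 0 := by
      rw [← hget, PySem.Dict.getD_of_not_contains st.1 (0 : Int) h']
    omega

-- B's loop started at any accumulator.
lemma suffixLoop_acc (ks : List (List Int)) (t : Int) :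
    numEquivSuffixLoop t ks = t + numEquivSuffixLoop 0 ks := by
  induction ks generalizing t with
  | nil => simp [numEquivSuffixLoop]
  | cons h tl ih =>
    simp only [numEquivSuffixLoop]
    rw [ih (t + _), ih ((0 : Int) + _)]
    ring

-- appending one key adds the same quantity to B's total.
lemma suffixLoop_append (ks : List (List Int)) (k : List Int) :
    numEquivSuffixLoop 0 (ks ++ [k]) = numEquivSuffixLoop 0 ks + (ks.count k : Int) := by
  induction ks with
  | nil => simp [numEquivSuffixLoop]
  | cons h tl ih =>
    simp only [List.cons_append, numEquivSuffixLoop]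
    rw [suffixLoop_acc, suffixLoop_acc tl, ih]
    by_cases hkh : k = h
    · subst hkh
      simp [List.count_append]
      ring
    · have h1 : (tl ++ [k]).count h = tl.count h := by
        simp [List.count_append, List.count_singleton]
        exact hkh
      have h2 : (h :: tl).count k = tl.count k := by
        simp [List.count_cons]
        exact fun e => hkh e.symm
      rw [h1, h2]
      ring

lemma totalA_eq_suffixLoop (ks : List (List Int)) : totalA ks = numEquivSuffixLoop 0 ks := by
  induction ks using List.reverseRecOn with
  | nil => rfl
  | append_singleton xs x ih => rw [totalA_append, suffixLoop_append, ih]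

-- ===== VERDICT (by name: the statement is the Claim_ definition above) =====
theorem num_equiv_species_pairs_spec : Claim_equal_num_equiv_species_pairs := by
  intro species_pairs _
  show num_equiv_species_pairs species_pairs = num_equiv_species_pairs_alt species_pairs
  have hA : num_equiv_species_pairs species_pairs
      = totalA (species_pairs.map (fun p => PySem.List.sorted p (fun x => x) false)) := by
    unfold num_equiv_species_pairs totalA
    rw [List.foldl_map]
  rw [hA]
  unfold num_equiv_species_pairs_alt
  exact totalA_eq_suffixLoop _
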